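-- pv_equiv track=rewrite | github.com/jaustindavid/iot | particle/coati/font.py | render_glyph
-- ===== SOURCE A (Python) =====
-- MEGAFONT_5X6: dict[str, list[int]] = {
--     "0": [0x70, 0x98, 0x98, 0x98, 0x98, 0x70],
--     "1": [0x30, 0x70, 0x30, 0x30, 0x30, 0x78],
--     "2": [0xF0, 0x18, 0x70, 0xC0, 0xC0, 0xF8],
--     "3": [0xF8, 0x18, 0x70, 0x18, 0x98, 0x70],
--     "4": [0x80, 0x98, 0xF8, 0x18, 0x18, 0x18],
--     "5": [0xF8, 0xC0, 0xF0, 0x18, 0x98, 0x70],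
--     "6": [0x70, 0xC0, 0xF0, 0xC8, 0xC8, 0x70],
--     "7": [0xF8, 0x18, 0x30, 0x60, 0x60, 0x60],
--     "8": [0x70, 0x98, 0x70, 0x98, 0x98, 0x70],
--     "9": [0x70, 0x98, 0x78, 0x18, 0x98, 0x70],
--     ":": [0x00, 0x18, 0x00, 0x00, 0x18, 0x00],
-- }
--
-- def render_glyph(char: str, x_offset: int, y_offset: int,
--                  grid_w: int, grid_h: int) -> set[tuple[int, int]]:
--     """Render a single character, return set of (x, y) positions that are lit."""
--     bitmaps = MEGAFONT_5X6.get(char)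
--     if bitmaps is None:
--         return set()
--     pixels: set[tuple[int, int]] = set()
--     for row, bits in enumerate(bitmaps):
--         for col in range(5):
--             if bits & (0x80 >> col):
--                 px = x_offset + col
--                 py = y_offset + row
--                 if 0 <= px < grid_w and 0 <= py < grid_h:
--                     pixels.add((px, py))
--     return pixels
-- ===== SOURCE B (Python) =====
-- MEGAFONT_5X6 = {
--     "0": [0x70, 0x98, 0x98, 0x98, 0x98, 0x70],
--     "1": [0x30, 0x70, 0x30, 0x30, 0x30, 0x78],
--     "2": [0xF0, 0x18, 0x70, 0xC0, 0xC0, 0xF8],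
--     "3": [0xF8, 0x18, 0x70, 0x18, 0x98, 0x70],
--     "4": [0x80, 0x98, 0xF8, 0x18, 0x18, 0x18],
--     "5": [0xF8, 0xC0, 0xF0, 0x18, 0x98, 0x70],
--     "6": [0x70, 0xC0, 0xF0, 0xC8, 0xC8, 0x70],
--     "7": [0xF8, 0x18, 0x30, 0x60, 0x60, 0x60],
--     "8": [0x70, 0x98, 0x70, 0x98, 0x98, 0x70],
--     "9": [0x70, 0x98, 0x78, 0x18, 0x98, 0x70],
--     ":": [0x00, 0x18, 0x00, 0x00, 0x18, 0x00],
-- }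
--
--
-- def _decode(bitmaps):
--     coords = []
--     for row, bits in enumerate(bitmaps):
--         for col in range(5):
--             if bits & (0x80 >> col):
--                 coords.append((col, row))
--     return coords
--
--
-- # Precomputed once at module load: char -> list of relative (col, row) lit positions.
-- RENDER_COORDS = {ch: _decode(bm) for ch, bm in MEGAFONT_5X6.items()}
--
--
-- def render_glyph(char, x_offset, y_offset, grid_w, grid_h):
--     """Render a single character, return set of (x, y) positions that are lit."""
--     coords = RENDER_COORDS.get(char)
--     if coords is None:
--         return set()
--     pixels = set()
--     for col, row in coords:
--         px = x_offset + col
--         py = y_offset + row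
--         if 0 <= px < grid_w and 0 <= py < grid_h:
--             pixels.add((px, py))
--     return pixels
-- ===== Notes on version B (the rewrite author's own statement) =====
-- stated objective: alternative
-- what changed: The per-call nested bit-decoding loop (enumerate rows x range(5) with a mask test) is removed: the font is decoded once at module load into a table of relative (col,row) lit coordinates, and render_glyph becomes a single pass over that list doing only offset+clip.
import Mathlib
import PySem

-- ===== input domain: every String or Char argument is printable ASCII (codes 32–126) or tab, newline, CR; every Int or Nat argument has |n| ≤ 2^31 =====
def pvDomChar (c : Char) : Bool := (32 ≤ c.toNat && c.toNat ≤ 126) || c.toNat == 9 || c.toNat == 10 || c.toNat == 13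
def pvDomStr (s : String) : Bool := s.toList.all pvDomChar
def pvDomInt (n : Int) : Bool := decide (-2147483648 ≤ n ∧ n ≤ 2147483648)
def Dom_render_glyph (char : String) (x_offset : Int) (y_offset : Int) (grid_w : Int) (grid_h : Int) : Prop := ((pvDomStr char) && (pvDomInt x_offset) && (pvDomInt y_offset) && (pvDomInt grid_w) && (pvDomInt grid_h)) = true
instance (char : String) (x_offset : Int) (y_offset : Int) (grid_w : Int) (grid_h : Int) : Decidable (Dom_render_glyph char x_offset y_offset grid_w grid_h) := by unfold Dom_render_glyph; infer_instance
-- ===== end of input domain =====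

-- B decodes the font bitmaps once at module load into a coordinate table, so render_glyph is a
-- single pass over precomputed (col,row) positions instead of a nested bit-test loop (objective: alternative decomposition).
-- Both programs return a set; the ports return its element list in insertion order (compared as a set).

-- ===== PORT A =====
def MEGAFONT_5X6 : PySem.Dict String (List Int) :=
  PySem.Dict.ofList [
    ("0", [0x70, 0x98, 0x98, 0x98, 0x98, 0x70]),
    ("1", [0x30, 0x70, 0x30, 0x30, 0x30, 0x78]),
    ("2", [0xF0, 0x18, 0x70, 0xC0, 0xC0, 0xF8]),
    ("3", [0xF8, 0x18, 0x70, 0x18, 0x98, 0x70]),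
    ("4", [0x80, 0x98, 0xF8, 0x18, 0x18, 0x18]),
    ("5", [0xF8, 0xC0, 0xF0, 0x18, 0x98, 0x70]),
    ("6", [0x70, 0xC0, 0xF0, 0xC8, 0xC8, 0x70]),
    ("7", [0xF8, 0x18, 0x30, 0x60, 0x60, 0x60]),
    ("8", [0x70, 0x98, 0x70, 0x98, 0x98, 0x70]),
    ("9", [0x70, 0x98, 0x78, 0x18, 0x98, 0x70]),
    (":", [0x00, 0x18, 0x00, 0x00, 0x18, 0x00])]

-- `bits & (0x80 >> col)`: col ∈ range(5) is nonnegative, so `col.toNat` is exact here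
def render_glyph (char : String) (x_offset : Int) (y_offset : Int) (grid_w : Int) (grid_h : Int) : List (Int × Int) :=
  match MEGAFONT_5X6.get? char with
  | none => PySem.Set.empty
  | some bitmaps =>
    (PySem.List.enumerate bitmaps).foldl (fun pixels rb =>
      (PySem.List.pyRange 0 5 1).foldl (fun pixels col =>
        if PySem.Int.band rb.2 ((128 : Int) >>> col.toNat) ≠ 0 then
          let px := x_offset + col
          let py := y_offset + rb.1
          if (0 ≤ px ∧ px < grid_w) ∧ (0 ≤ py ∧ py < grid_h) then
            PySem.Set.add pixels (px, py)
          else pixels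
        else pixels) pixels) PySem.Set.empty

-- ===== PORT B =====
-- _decode from Source B (run once, below, to build RENDER_COORDS)
def pvDecodeGlyph (bitmaps : List Int) : List (Int × Int) :=
  (PySem.List.enumerate bitmaps).foldl (fun coords rb =>
    (PySem.List.pyRange 0 5 1).foldl (fun coords col =>
      if PySem.Int.band rb.2 ((128 : Int) >>> col.toNat) ≠ 0 then
        coords ++ [(col, rb.1)]
      else coords) coords) []

def RENDER_COORDS : PySem.Dict String (List (Int × Int)) :=
  PySem.Dict.ofList (MEGAFONT_5X6.items.map (fun p => (p.1, pvDecodeGlyph p.2)))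

def render_glyph_alt (char : String) (x_offset : Int) (y_offset : Int) (grid_w : Int) (grid_h : Int) : List (Int × Int) :=
  match RENDER_COORDS.get? char with
  | none => PySem.Set.empty
  | some coords =>
    coords.foldl (fun pixels cr =>
      let px := x_offset + cr.1
      let py := y_offset + cr.2
      if (0 ≤ px ∧ px < grid_w) ∧ (0 ≤ py ∧ py < grid_h) then
        PySem.Set.add pixels (px, py)
      else pixels) PySem.Set.empty

-- ===== PRECONDITION & SPEC =====
def Spec_render_glyph (char : String) (x_offset : Int) (y_offset : Int) (grid_w : Int) (grid_h : Int) (out : List (Int × Int)) : Prop := out = render_glyph_alt char x_offset y_offset grid_w grid_h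
instance (char : String) (x_offset : Int) (y_offset : Int) (grid_w : Int) (grid_h : Int) (out : List (Int × Int)) : Decidable (Spec_render_glyph char x_offset y_offset grid_w grid_h out) := by unfold Spec_render_glyph; infer_instance

-- ===== CLAIM (what is proved, stated in full; the proofs are below) =====
def Claim_equal_render_glyph : Prop := ∀ (char : String) (x_offset : Int) (y_offset : Int) (grid_w : Int) (grid_h : Int), Dom_render_glyph char x_offset y_offset grid_w grid_h → Spec_render_glyph char x_offset y_offset grid_w grid_h (render_glyph char x_offset y_offset grid_w grid_h)

-- ===== LEMMAS AND PROOFS =====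

-- B's per-pixel step, used to state the loop correspondence
def pvStep (x_offset y_offset grid_w grid_h : Int) :
    PySem.Set (Int × Int) → (Int × Int) → PySem.Set (Int × Int) :=
  fun pixels cr =>
    let px := x_offset + cr.1
    let py := y_offset + cr.2
    if (0 ≤ px ∧ px < grid_w) ∧ (0 ≤ py ∧ py < grid_h) then
      PySem.Set.add pixels (px, py)
    else pixels

-- A's inner column loop for one row equals folding pvStep over that row's decoded coordinates
theorem pv_inner_eq (x_offset y_offset grid_w grid_h : Int) (rb : Int × Int)
    (s : PySem.Set (Int × Int)) :
    (PySem.List.pyRange 0 5 1).foldl (fun pixels col =>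
        if PySem.Int.band rb.2 ((128 : Int) >>> col.toNat) ≠ 0 then
          let px := x_offset + col
          let py := y_offset + rb.1
          if (0 ≤ px ∧ px < grid_w) ∧ (0 ≤ py ∧ py < grid_h) then
            PySem.Set.add pixels (px, py)
          else pixels
        else pixels) s
    = (((PySem.List.pyRange 0 5 1).filter
          (fun col => decide (PySem.Int.band rb.2 ((128 : Int) >>> col.toNat) ≠ 0))).map
          (fun col => ((col : Int), rb.1))).foldl (pvStep x_offset y_offset grid_w grid_h) s := by
  rw [List.foldl_map]
  exact PySem.List.foldl_ite_eq_foldl_filter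
      (p := fun col : Int => PySem.Int.band rb.2 ((128 : Int) >>> col.toNat) ≠ 0)
      (f := fun s (col : Int) => pvStep x_offset y_offset grid_w grid_h s ((col : Int), rb.1))
      (l := PySem.List.pyRange 0 5 1) (init := s)

-- B's inner decoding loop builds exactly that row's coordinate list
theorem pv_inner_dec (rb : Int × Int) (acc : List (Int × Int)) :
    (PySem.List.pyRange 0 5 1).foldl (fun coords col =>
        if PySem.Int.band rb.2 ((128 : Int) >>> col.toNat) ≠ 0 then
          coords ++ [(col, rb.1)]
        else coords) acc
    = acc ++ ((PySem.List.pyRange 0 5 1).filter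
          (fun col => decide (PySem.Int.band rb.2 ((128 : Int) >>> col.toNat) ≠ 0))).map
          (fun col => ((col : Int), rb.1)) := by
  exact PySem.List.foldl_append_ite
      (p := fun col : Int => PySem.Int.band rb.2 ((128 : Int) >>> (col.toNat : Int)) ≠ 0)
      (f := fun col : Int => ((col : Int), rb.1)) _ _

-- outer loops correspond, generalized over the decode accumulator and the pixel set
theorem pv_main (x_offset y_offset grid_w grid_h : Int) :
    ∀ (l : List (Int × Int)) (acc : List (Int × Int)) (s : PySem.Set (Int × Int)),
    l.foldl (fun pixels rb =>
      (PySem.List.pyRange 0 5 1).foldl (fun pixels col =>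
        if PySem.Int.band rb.2 ((128 : Int) >>> col.toNat) ≠ 0 then
          let px := x_offset + col
          let py := y_offset + rb.1
          if (0 ≤ px ∧ px < grid_w) ∧ (0 ≤ py ∧ py < grid_h) then
            PySem.Set.add pixels (px, py)
          else pixels
        else pixels) pixels) (acc.foldl (pvStep x_offset y_offset grid_w grid_h) s)
    = (l.foldl (fun coords rb =>
        (PySem.List.pyRange 0 5 1).foldl (fun coords col =>
          if PySem.Int.band rb.2 ((128 : Int) >>> col.toNat) ≠ 0 then
            coords ++ [(col, rb.1)]
          else coords) coords) acc).foldl (pvStep x_offset y_offset grid_w grid_h) s := by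
  intro l
  induction l with
  | nil => intro acc s; rfl
  | cons rb t ih =>
    intro acc s
    simp only [List.foldl_cons]
    rw [pv_inner_eq, ← List.foldl_append, ih (acc ++ _) s, pv_inner_dec]

-- lookup correspondence: RENDER_COORDS is the decoded MEGAFONT_5X6, key by key
theorem pv_lookup (char : String) :
    RENDER_COORDS.get? char = (MEGAFONT_5X6.get? char).map pvDecodeGlyph := by
  by_cases e0 : char = "0"
  · subst e0; decide
  by_cases e1 : char = "1"
  · subst e1; decide
  by_cases e2 : char = "2"
  · subst e2; decide
  by_cases e3 : char = "3"
  · subst e3; decide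
  by_cases e4 : char = "4"
  · subst e4; decide
  by_cases e5 : char = "5"
  · subst e5; decide
  by_cases e6 : char = "6"
  · subst e6; decide
  by_cases e7 : char = "7"
  · subst e7; decide
  by_cases e8 : char = "8"
  · subst e8; decide
  by_cases e9 : char = "9"
  · subst e9; decide
  by_cases e10 : char = ":"
  · subst e10; decide
  · have hkA : char ∉ MEGAFONT_5X6.keys := by
      have hk : MEGAFONT_5X6.keys = ["0","1","2","3","4","5","6","7","8","9",":"] := by decide
      rw [hk]; simp [e0, e1, e2, e3, e4, e5, e6, e7, e8, e9, e10]
    have hkB : char ∉ RENDER_COORDS.keys := by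
      have hk : RENDER_COORDS.keys = ["0","1","2","3","4","5","6","7","8","9",":"] := by decide
      rw [hk]; simp [e0, e1, e2, e3, e4, e5, e6, e7, e8, e9, e10]
    rw [(PySem.Dict.get?_eq_none_iff_not_mem_keys MEGAFONT_5X6 char).mpr hkA,
        (PySem.Dict.get?_eq_none_iff_not_mem_keys RENDER_COORDS char).mpr hkB]
    rfl

-- ===== VERDICT (by name: the statement is the Claim_ definition above) =====
theorem render_glyph_spec : Claim_equal_render_glyph := by
  intro char x_offset y_offset grid_w grid_h _hdom
  unfold Spec_render_glyph render_glyph render_glyph_alt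
  rw [pv_lookup char]
  cases h : MEGAFONT_5X6.get? char with
  | none => rfl
  | some bitmaps =>
    show _ = (pvDecodeGlyph bitmaps).foldl _ PySem.Set.empty
    unfold pvDecodeGlyph
    exact pv_main x_offset y_offset grid_w grid_h (PySem.List.enumerate bitmaps) [] PySem.Set.empty
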